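-- pv_equiv track=rewrite | github.com/rajectedguy/GeeksforGeeksPOTD | 2026_GFG_POTD/JANUARY/18-01-2026/Next element with greater frequency.py | nextFreqGreater
-- ===== SOURCE A (Python) =====
-- from collections import Counter
--
-- def nextFreqGreater(arr):
--     dic=Counter(arr)
--     ans=[]
--     stack=[]
--     for i in arr[::-1]:
--         while stack and stack[-1][0]<=dic[i]:
--             stack.pop()
--         if stack:
--             ans.append(stack[-1][1])
--         else:
--             ans.append(-1)
--         stack.append([dic[i],i])
--     return ans[::-1]
-- ===== SOURCE B (Python) =====
-- from collections import Counter
--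
-- def nextFreqGreater(arr):
--     freq = Counter(arr)
--     ans = []
--     for j, x in enumerate(arr):
--         ans.append(next((y for y in arr[j+1:] if freq[y] > freq[x]), -1))
--     return ans
-- ===== Notes on version B (the rewrite author's own statement) =====
-- stated objective: simpler
-- what changed: Replaced the reverse-pass monotonic stack over (frequency, value) pairs with a direct forward scan: for each position, pick the first element to its right whose Counter frequency is strictly greater, else -1.
import Mathlib
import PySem

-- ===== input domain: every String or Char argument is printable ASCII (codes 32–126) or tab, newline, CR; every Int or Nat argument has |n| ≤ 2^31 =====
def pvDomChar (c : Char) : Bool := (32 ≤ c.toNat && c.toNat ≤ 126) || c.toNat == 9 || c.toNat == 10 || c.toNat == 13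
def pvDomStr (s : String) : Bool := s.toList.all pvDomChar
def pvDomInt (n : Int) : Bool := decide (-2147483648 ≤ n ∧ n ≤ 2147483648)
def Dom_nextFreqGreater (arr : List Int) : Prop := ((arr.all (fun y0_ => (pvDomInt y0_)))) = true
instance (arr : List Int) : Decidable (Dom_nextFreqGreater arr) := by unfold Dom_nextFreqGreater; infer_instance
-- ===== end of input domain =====

-- B replaces A's reverse-pass monotonic stack by a direct per-element forward scan; objective: simpler.


-- ===== PORT A =====
-- literal port of A: Counter, then a fold over arr[::-1] carrying (ans, stack);
-- the Python stack (last element = top) is modelled head-first (head = top: append = cons, pop = tail)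
def nextFreqGreater (arr : List Int) : List Int :=
  let dic := PySem.Dict.counter arr
  let st :=
    ((PySem.List.slice? arr none none (-1)).getD []).foldl
      (fun (st : List Int × List (Int × Int)) i =>
        let stack1 := st.2.dropWhile (fun p => p.1 ≤ dic.getD i 0)
        let a : Int := match stack1 with
          | [] => -1
          | p :: _ => p.2
        (st.1 ++ [a], (dic.getD i 0, i) :: stack1))
      ([], [])
  (PySem.List.slice? st.1 none none (-1)).getD []

-- ===== PORT B =====
-- literal port of B: freq = Counter(arr); for each (j, x) in enumerate(arr),
-- append the first y of arr[j+1:] with freq[y] > freq[x], else -1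
def nextFreqGreater_alt (arr : List Int) : List Int :=
  let freq := PySem.Dict.counter arr
  (PySem.List.enumerate arr 0).foldl
    (fun ans jx =>
      ans ++ [((PySem.List.slice arr (some (jx.1 + 1)) none).find?
                 (fun y => freq.getD jx.2 0 < freq.getD y 0)).getD (-1)])
    []

-- ===== PRECONDITION & SPEC =====
def Spec_nextFreqGreater (arr : List Int) (out : List Int) : Prop := out = nextFreqGreater_alt arr
instance (arr : List Int) (out : List Int) : Decidable (Spec_nextFreqGreater arr out) := by unfold Spec_nextFreqGreater; infer_instance

-- ===== CLAIM (what is proved, stated in full; the proofs are below) =====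
def Claim_equal_nextFreqGreater : Prop := ∀ (arr : List Int), Dom_nextFreqGreater arr → Spec_nextFreqGreater arr (nextFreqGreater arr)

-- ===== LEMMAS AND PROOFS =====

-- B's answers, one per suffix, with a trailing context q (used with q = [])
def bspec (f : Int → Int) : List Int → List Int → List Int
  | [], _ => []
  | x :: rest, q => (((rest ++ q).find? (fun y => f x < f y)).getD (-1)) :: bspec f rest q

-- A's loop, recursively: state is the stack; answers emitted in processing order
def aloop (f : Int → Int) : List Int → List (Int × Int) → List Int × List (Int × Int)
  | [], st => ([], st)
  | i :: rest, st =>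
      let st1 := st.dropWhile (fun p => p.1 ≤ f i)
      let a : Int := match st1 with
        | [] => -1
        | p :: _ => p.2
      let r := aloop f rest ((f i, i) :: st1)
      (a :: r.1, r.2)

-- the stack A holds after processing q (head = most recently processed)
def stk (f : Int → Int) : List Int → List (Int × Int)
  | [] => []
  | x :: rest => (f x, x) :: (stk f rest).dropWhile (fun p => p.1 ≤ f x)

-- answers of A's loop, with the processed context kept as a plain list
def goA (f : Int → Int) : List Int → List Int → List Int
  | [], _ => []
  | i :: rest, q => (((q.find? (fun y => f i < f y)).getD (-1))) :: goA f rest (i :: q)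

lemma find?_dropWhile (p q : Int × Int → Bool) (h : ∀ x, q x = true → p x = false) :
    ∀ (l : List (Int × Int)), (l.dropWhile q).find? p = l.find? p := by
  intro l
  induction l with
  | nil => rfl
  | cons x t ih =>
      by_cases hq : q x = true
      · simp [hq, ih, List.find?, h x hq]
      · simp [hq]

lemma find?_stk (f : Int → Int) (c : Int) :
    ∀ q : List Int,
      (stk f q).find? (fun p => c < p.1) =
        (q.find? (fun y => c < f y)).map (fun y => (f y, y)) := by
  intro q
  induction q with
  | nil => rfl
  | cons y t ih =>
      by_cases hc : c < f y
      · simp [stk, List.find?, hc]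
      · have hyc : f y ≤ c := not_lt.mp hc
        have hdrop :
            ((stk f t).dropWhile (fun p => p.1 ≤ f y)).find? (fun p => decide (c < p.1)) =
              (stk f t).find? (fun p => decide (c < p.1)) := by
          apply find?_dropWhile
          intro x hx
          simp only [decide_eq_true_eq] at hx
          simp only [decide_eq_false_iff_not, not_lt]
          exact le_trans hx hyc
        simp [stk, List.find?, hc, hdrop, ih]

lemma head?_dropWhile_stk (f : Int → Int) (c : Int) (q : List Int) :
    ((stk f q).dropWhile (fun p => p.1 ≤ c)).head? =
      (q.find? (fun y => c < f y)).map (fun y => (f y, y)) := by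
  rw [← find?_stk]
  induction (stk f q) with
  | nil => rfl
  | cons x t ih =>
      by_cases h : x.1 ≤ c
      · simp [List.find?, h, not_lt.mpr h, ih]
      · simp [List.find?, h, lt_of_not_ge h]

lemma aloop_eq_goA (f : Int → Int) :
    ∀ (l q : List Int), (aloop f l (stk f q)).1 = goA f l q := by
  intro l
  induction l with
  | nil => intro q; rfl
  | cons i rest ih =>
      intro q
      have hhead := head?_dropWhile_stk f (f i) q
      have hstep : (f i, i) :: (stk f q).dropWhile (fun p => p.1 ≤ f i) = stk f (i :: q) := rfl
      cases hfind : q.find? (fun y => f i < f y) with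
      | none =>
          rw [hfind] at hhead
          have hnil : (stk f q).dropWhile (fun p => p.1 ≤ f i) = [] :=
            List.head?_eq_none_iff.mp (by simpa using hhead)
          simp only [aloop, goA, hfind, hnil] at *
          simpa [hnil] using congrArg (fun s => (-1 : Int) :: s) (by
            have := ih (i :: q)
            rw [← hstep] at this
            simpa [hnil] using this)
      | some y =>
          rw [hfind] at hhead
          obtain ⟨t, ht⟩ : ∃ t, (stk f q).dropWhile (fun p => p.1 ≤ f i) = (f y, y) :: t := by
            cases hd : (stk f q).dropWhile (fun p => p.1 ≤ f i) with
            | nil => rw [hd] at hhead; simp at hhead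
            | cons a t =>
                rw [hd] at hhead
                simp only [List.head?_cons, Option.map_some, Option.some.injEq] at hhead
                exact ⟨t, by rw [hhead]⟩
          have hrec := ih (i :: q)
          rw [← hstep, ht] at hrec
          simp only [aloop, goA, hfind, ht]
          simpa [ht] using congrArg (fun s => y :: s) hrec

lemma goA_append (f : Int → Int) :
    ∀ (a b q : List Int), goA f (a ++ b) q = goA f a q ++ goA f b (a.reverse ++ q) := by
  intro a
  induction a with
  | nil => intro b q; simp [goA]
  | cons x t ih =>
      intro b q
      simp [goA, ih, List.append_assoc]

lemma goA_reverse_eq_bspec (f : Int → Int) :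
    ∀ (l q : List Int), goA f l.reverse q = (bspec f l q).reverse := by
  intro l
  induction l with
  | nil => intro q; rfl
  | cons x rest ih =>
      intro q
      have : (x :: rest).reverse = rest.reverse ++ [x] := by simp
      rw [this, goA_append, ih]
      simp [goA, bspec]

-- A's port equals bspec with f = count
lemma portA_eq_bspec (arr : List Int) :
    nextFreqGreater arr = bspec (fun y => (arr.count y : Int)) arr [] := by
  show (PySem.List.slice?
      (List.foldl
        (fun (st : List Int × List (Int × Int)) i =>
          let stack1 := st.2.dropWhile (fun p => p.1 ≤ (PySem.Dict.counter arr).getD i 0)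
          let a : Int := match stack1 with | [] => -1 | p :: _ => p.2
          (st.1 ++ [a], ((PySem.Dict.counter arr).getD i 0, i) :: stack1))
        ([], []) ((PySem.List.slice? arr none none (-1)).getD [])).1
      none none (-1)).getD [] = _
  rw [PySem.List.slice?_none_none_neg_one]
  simp only [Option.getD_some]
  have hfold :
      ∀ (l : List Int) (acc : List Int) (st : List (Int × Int)),
        l.foldl
          (fun (st : List Int × List (Int × Int)) i =>
            let stack1 := st.2.dropWhile (fun p => p.1 ≤ (PySem.Dict.counter arr).getD i 0)
            let a : Int := match stack1 with
              | [] => -1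
              | p :: _ => p.2
            (st.1 ++ [a], ((PySem.Dict.counter arr).getD i 0, i) :: stack1))
          (acc, st) =
        (acc ++ (aloop (fun y => ((PySem.Dict.counter arr).getD y 0)) l st).1,
         (aloop (fun y => ((PySem.Dict.counter arr).getD y 0)) l st).2) := by
    intro l
    induction l with
    | nil => intro acc st; simp [aloop]
    | cons i rest ih =>
        intro acc st
        simp only [List.foldl_cons, aloop, ih, List.append_assoc, List.cons_append,
          List.nil_append]
  rw [hfold]
  have hf : (fun y => ((PySem.Dict.counter arr).getD y 0)) = fun y => (arr.count y : Int) := by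
    funext y; exact PySem.Dict.getD_counter arr y
  simp only [hf]
  have h1 : (aloop (fun y => (arr.count y : Int)) arr.reverse []).1 =
      goA (fun y => (arr.count y : Int)) arr.reverse [] := by
    have := aloop_eq_goA (fun y => (arr.count y : Int)) arr.reverse []
    simpa [stk] using this
  rw [PySem.List.slice?_none_none_neg_one]
  simp only [List.nil_append, Option.getD_some, h1,
    goA_reverse_eq_bspec (fun y => (arr.count y : Int)) arr [], List.reverse_reverse]

-- B's port equals bspec with f = count
lemma portB_enum (arr : List Int) (f : Int → Int)
    (hf : ∀ y, ((PySem.Dict.counter arr).getD y 0) = f y) :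
    ∀ (t : List Int) (k : Nat), arr.drop k = t →
      (PySem.List.enumerate t (k : Int)).map
          (fun jx => ((PySem.List.slice arr (some (jx.1 + 1)) none).find?
              (fun y => (PySem.Dict.counter arr).getD jx.2 0 < (PySem.Dict.counter arr).getD y 0)).getD (-1)) =
        bspec f t [] := by
  intro t
  induction t with
  | nil => intro k _; simp [PySem.List.enumerate_nil, bspec]
  | cons x rest ih =>
      intro k hk
      have hdrop1 : arr.drop (k + 1) = rest := by
        have : arr.drop (k + 1) = (arr.drop k).tail := by
          rw [← List.drop_drop]; simp
        rw [this, hk]; rfl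
      rw [PySem.List.enumerate_cons, List.map_cons]
      have hcast : ((k : Int) + 1) = ((k + 1 : Nat) : Int) := by push_cast; ring
      have hslice : PySem.List.slice arr (some ((k : Int) + 1)) none = rest := by
        rw [hcast, PySem.List.slice_from_natCast, hdrop1]
      rw [hslice]
      have htail := ih (k + 1) hdrop1
      rw [hcast, htail]
      simp only [bspec, List.append_nil, hf]

lemma portB_eq_bspec (arr : List Int) :
    nextFreqGreater_alt arr = bspec (fun y => (arr.count y : Int)) arr [] := by
  unfold nextFreqGreater_alt
  rw [PySem.List.foldl_append_singleton_eq_map]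
  simp only [List.nil_append]
  exact portB_enum arr (fun y => (arr.count y : Int))
    (fun y => PySem.Dict.getD_counter arr y) arr 0 rfl

-- ===== VERDICT (by name: the statement is the Claim_ definition above) =====
theorem nextFreqGreater_spec : Claim_equal_nextFreqGreater := by
  intro arr _
  unfold Spec_nextFreqGreater
  rw [portA_eq_bspec, portB_eq_bspec]
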